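-- pv_equiv track=rewrite | github.com/mavlink/qgroundcontrol | tools/translations/dict_base.py | encode_html_entities
-- ===== SOURCE A (Python) =====
-- def encode_html_entities(text):
--     replacements = {
--         "'":'&apos;',
--         '"':'&quot;',
--         # '&':'&amp;',   # don't encode this
--         '<':'&lt;',
--         '>':'&gt;',
--     }
--     result = text
--     for entity, char in replacements.items():
--         result = result.replace(entity, char)
--     return result
-- ===== SOURCE B (Python) =====
-- def encode_html_entities(text):
--     mapping = {
--         "'": '&apos;',
--         '"': '&quot;',
--         '<': '&lt;',
--         '>': '&gt;',
--     }
--     return ''.join(mapping.get(ch, ch) for ch in text)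
-- ===== Notes on version B (the rewrite author's own statement) =====
-- stated objective: alternative
-- what changed: replaces A's four sequential full-string str.replace passes with a single pass over the characters that emits mapping.get(ch, ch) and joins once
import Mathlib
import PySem

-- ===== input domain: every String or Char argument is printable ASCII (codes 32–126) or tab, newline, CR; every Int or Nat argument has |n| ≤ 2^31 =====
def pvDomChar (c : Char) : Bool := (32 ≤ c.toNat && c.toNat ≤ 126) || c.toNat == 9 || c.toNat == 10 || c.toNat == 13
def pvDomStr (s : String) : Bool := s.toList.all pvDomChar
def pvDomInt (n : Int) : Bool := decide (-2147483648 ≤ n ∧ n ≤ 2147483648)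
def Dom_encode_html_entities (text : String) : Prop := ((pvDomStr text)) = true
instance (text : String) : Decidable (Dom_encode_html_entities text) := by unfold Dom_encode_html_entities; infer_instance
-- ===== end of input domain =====

-- B replaces A's four sequential full-string replace passes with one pass emitting a per-character lookup; same return value on all inputs.


-- ===== PORT A =====
def encode_html_entities (text : String) : String :=
  let replacements : PySem.Dict String String :=
    ((((PySem.Dict.empty.insert "'" "&apos;").insert "\"" "&quot;").insert "<" "&lt;").insert ">" "&gt;")
  replacements.items.foldl (fun result ec => PySem.Str.replace result ec.1 ec.2) text

-- ===== PORT B =====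
def encode_html_entities_alt (text : String) : String :=
  let mapping : PySem.Dict Char String :=
    ((((PySem.Dict.empty.insert '\'' "&apos;").insert '"' "&quot;").insert '<' "&lt;").insert '>' "&gt;")
  PySem.Str.join "" (text.toList.map (fun ch => mapping.getD ch (String.ofList [ch])))

-- ===== PRECONDITION & SPEC =====
def Spec_encode_html_entities (text : String) (out : String) : Prop := out = encode_html_entities_alt text
instance (text : String) (out : String) : Decidable (Spec_encode_html_entities text out) := by unfold Spec_encode_html_entities; infer_instance

-- ===== CLAIM (what is proved, stated in full; the proofs are below) =====
def Claim_equal_encode_html_entities : Prop := ∀ (text : String), Dom_encode_html_entities text → Spec_encode_html_entities text (encode_html_entities text)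

-- ===== LEMMAS AND PROOFS =====

-- replacing a single-character pattern is a per-character expansion
theorem replace_go_single (a : Char) (new : List Char) :
    ∀ (l acc : List Char), PySem.Chars.replace.go [a] new l.length l acc
      = acc.reverse ++ l.flatMap (fun c => if c = a then new else [c]) := by
  intro l
  induction l with
  | nil => intro acc; simp [PySem.Chars.replace.go]
  | cons c t ih =>
    intro acc
    simp only [List.length_cons, PySem.Chars.replace.go, List.isPrefixOf, List.flatMap_cons]
    by_cases h : c = a
    · subst h
      simp [ih]
    · have : (a == c) = false := by simp at *; exact fun hh => h hh.symm
      simp [this, ih, h]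

theorem replace_single (a : Char) (new l : List Char) :
    PySem.Chars.replace l [a] new = l.flatMap (fun c => if c = a then new else [c]) := by
  simpa using replace_go_single a new l []

theorem join_empty_flatten (l : List (List Char)) : PySem.Chars.join [] l = l.flatten := by
  simp only [PySem.Chars.join, List.intercalate]
  induction l with
  | nil => rfl
  | cons x t ih => cases t <;> simp_all [List.intersperse]

-- the per-character value of B's lookup
theorem alt_char (c : Char) :
    (((((PySem.Dict.empty.insert '\'' "&apos;").insert '"' "&quot;").insert '<' "&lt;").insert '>' "&gt;").getD
      c (String.ofList [c])).toList
    = if c = '\'' then "&apos;".toList else if c = '"' then "&quot;".toList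
      else if c = '<' then "&lt;".toList else if c = '>' then "&gt;".toList else [c] := by
  by_cases h1 : c = '\''; · subst h1; decide
  by_cases h2 : c = '"'; · subst h2; decide
  by_cases h3 : c = '<'; · subst h3; decide
  by_cases h4 : c = '>'; · subst h4; decide
  have e1 : ('\'' == c) = false := by simp [Ne.symm h1]
  have e2 : ('"' == c) = false := by simp [Ne.symm h2]
  have e3 : ('<' == c) = false := by simp [Ne.symm h3]
  have e4 : ('>' == c) = false := by simp [Ne.symm h4]
  simp [PySem.Dict.getD, PySem.Dict.get?, PySem.Dict.insert, PySem.Dict.empty, List.find?,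
    e1, e2, e3, e4, h1, h2, h3, h4]

-- ===== VERDICT (by name: the statement is the Claim_ definition above) =====
theorem encode_html_entities_spec : Claim_equal_encode_html_entities := by
  intro text _
  unfold Spec_encode_html_entities
  rw [← String.toList_inj]
  show (List.foldl (fun result ec => PySem.Str.replace result ec.1 ec.2)
      text [("'", "&apos;"), ("\"", "&quot;"), ("<", "&lt;"), (">", "&gt;")]).toList = _
  simp only [List.foldl, PySem.Str.toList_replace, encode_html_entities_alt,
    PySem.Str.toList_join, List.map_map]
  rw [show ("" : String).toList = [] from rfl]
  rw [join_empty_flatten]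
  rw [show ("'" : String).toList = ['\''] from rfl, show ("\"" : String).toList = ['"'] from rfl,
      show ("<" : String).toList = ['<'] from rfl, show (">" : String).toList = ['>'] from rfl]
  rw [replace_single, replace_single, replace_single, replace_single]
  simp only [List.flatMap_assoc, Function.comp_def]
  apply List.flatMap_congr  -- may need different name
  intro c _
  rw [alt_char]
  by_cases h1 : c = '\''; · subst h1; decide
  by_cases h2 : c = '"'; · subst h2; decide
  by_cases h3 : c = '<'; · subst h3; decide
  by_cases h4 : c = '>'; · subst h4; decide
  simp [h1, h2, h3, h4]
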